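-- pv_equiv track=rewrite | github.com/daydream2002/rlcode | mah_tool/feature_extract_v10.py | shunziNum
-- ===== SOURCE A (Python) =====
-- def shunziNum(actions):
--     """
--     某个顺子个数
--     @param actions: 副露
--     @return: 顺子个数
--     """
--     feature = [0, 0, 0, 0, 0, 0, 0, 0, 0, 0, 0, 0, 0, 0, 0, 0, 0, 0, 0, 0, 0]
--     wan = []
--     tiao = []
--     tong = []
--
--     # wan
--     for i in range(len(actions)):
--         if actions[i][0] != actions[i][1] and actions[i][0] < 8:
--             wan.append(actions[i])
--
--     for j in range(len(wan)):
--         feature[wan[j][0] - 1] += 1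
--
--     # tiao
--     for i in range(len(actions)):
--         if actions[i][0] != actions[i][1] and 16 < actions[i][0] < 26:
--             tiao.append(actions[i])
--
--     for j in range(len(tiao)):
--         feature[tiao[j][0] - 10] += 1
--
--     # tong
--     for i in range(len(actions)):
--         if actions[i][0] != actions[i][1] and actions[i][0] > 32:
--             tong.append(actions[i])
--
--     for j in range(len(tong)):
--         feature[tong[j][0] - 19] += 1
--
--     return feature
-- ===== SOURCE B (Python) =====
-- def shunziNum(actions):
--     """
--     某个顺子个数
--     @param actions: 副露
--     @return: 顺子个数
--     """
--     feature = [0] * 21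
--     for a in actions:
--         if a[0] != a[1]:
--             if a[0] < 8:
--                 feature[a[0] - 1] += 1
--             elif 16 < a[0] < 26:
--                 feature[a[0] - 10] += 1
--             elif a[0] > 32:
--                 feature[a[0] - 19] += 1
--     return feature
-- ===== Notes on version B (the rewrite author's own statement) =====
-- stated objective: simpler
-- what changed: Replaces A's six passes (three filter passes building wan/tiao/tong lists plus three tally passes) with a single direct tally loop over actions.
import Mathlib
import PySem

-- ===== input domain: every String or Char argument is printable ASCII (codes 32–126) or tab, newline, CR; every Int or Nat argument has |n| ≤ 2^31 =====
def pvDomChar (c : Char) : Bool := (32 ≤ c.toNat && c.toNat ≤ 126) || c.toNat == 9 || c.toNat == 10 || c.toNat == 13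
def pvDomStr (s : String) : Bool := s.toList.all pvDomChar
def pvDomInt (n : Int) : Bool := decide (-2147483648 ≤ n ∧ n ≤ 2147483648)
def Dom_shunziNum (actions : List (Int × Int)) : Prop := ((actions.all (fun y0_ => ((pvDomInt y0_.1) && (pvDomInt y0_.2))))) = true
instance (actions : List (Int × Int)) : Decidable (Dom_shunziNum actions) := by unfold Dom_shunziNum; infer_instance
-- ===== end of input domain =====

-- B replaces A's six passes (three filter passes building wan/tiao/tong plus three tally passes)
-- with one direct tally loop over actions; same values everywhere A returns.

-- shared helper: Python's 'feature[i] += 1' (get then set at a possibly negative index)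
def pvBump (f : List Int) (i : Int) : List Int :=
  PySem.List.pySetD f i (PySem.List.pyGetD f i 0 + 1)

-- ===== PORT A =====
def shunziNum (actions : List (Int × Int)) : List Int :=
  let feature : List Int := [0, 0, 0, 0, 0, 0, 0, 0, 0, 0, 0, 0, 0, 0, 0, 0, 0, 0, 0, 0, 0]
  -- wan
  let wan := actions.foldl (fun w a => if a.1 ≠ a.2 ∧ a.1 < 8 then w ++ [a] else w) ([] : List (Int × Int))
  let feature := wan.foldl (fun f a => pvBump f (a.1 - 1)) feature
  -- tiao
  let tiao := actions.foldl (fun w a => if a.1 ≠ a.2 ∧ 16 < a.1 ∧ a.1 < 26 then w ++ [a] else w) ([] : List (Int × Int))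
  let feature := tiao.foldl (fun f a => pvBump f (a.1 - 10)) feature
  -- tong
  let tong := actions.foldl (fun w a => if a.1 ≠ a.2 ∧ 32 < a.1 then w ++ [a] else w) ([] : List (Int × Int))
  let feature := tong.foldl (fun f a => pvBump f (a.1 - 19)) feature
  feature

-- ===== PORT B =====
def shunziNum_alt (actions : List (Int × Int)) : List Int :=
  actions.foldl (fun f a =>
    if a.1 ≠ a.2 then
      if a.1 < 8 then pvBump f (a.1 - 1)
      else if 16 < a.1 ∧ a.1 < 26 then pvBump f (a.1 - 10)
      else if 32 < a.1 then pvBump f (a.1 - 19)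
      else f
    else f) (List.replicate 21 0)

-- ===== PRECONDITION & SPEC =====
-- Pre_ excludes exactly the inputs on which A raises IndexError: an action with unequal
-- components whose first component is below -20 (wan index < -21) or above 39 (tong index > 20).
def Pre_shunziNum (actions : List (Int × Int)) : Prop :=
  ∀ a ∈ actions, a.1 ≠ a.2 → (a.1 < 8 → -20 ≤ a.1) ∧ (32 < a.1 → a.1 ≤ 39)
instance (actions : List (Int × Int)) : Decidable (Pre_shunziNum actions) := by
  unfold Pre_shunziNum; infer_instance
def pvWitness_shunziNum : (List (Int × Int)) := [(1, 2), (17, 18), (33, 34), (5, 5), (-3, 4)]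

def Spec_shunziNum (actions : List (Int × Int)) (out : List Int) : Prop := out = shunziNum_alt actions
instance (actions : List (Int × Int)) (out : List Int) : Decidable (Spec_shunziNum actions out) := by unfold Spec_shunziNum; infer_instance

-- ===== CLAIM (what is proved, stated in full; the proofs are below) =====
def Claim_equal_shunziNum : Prop := ∀ (actions : List (Int × Int)), Dom_shunziNum actions → Pre_shunziNum actions → Spec_shunziNum actions (shunziNum actions)

-- ===== LEMMAS AND PROOFS =====

-- A's filter-pass-then-tally-pass equals one conditional fold.
theorem pv_build_fold {α β : Type} (p : α → Prop) [DecidablePred p] (g : β → α → β) :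
    ∀ (l acc : List α) (s : β),
      (l.foldl (fun w a => if p a then w ++ [a] else w) acc).foldl g s
        = l.foldl (fun s a => if p a then g s a else s) (acc.foldl g s) := by
  intro l
  induction l with
  | nil => intro acc s; rfl
  | cons a t ih =>
      intro acc s
      by_cases h : p a
      · simp only [List.foldl_cons, if_pos h, ih, List.foldl_append, List.foldl_cons,
          List.foldl_nil]
      · simp only [List.foldl_cons, if_neg h, ih]

theorem pvBump_length (f : List Int) (i : Int) : (pvBump f i).length = f.length := by
  simp [pvBump, PySem.List.pySetD, PySem.List.pySet?]
  cases h : PySem.List.pyIdx? f.length i <;> simp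

-- pyIdx? resolves in range
theorem pv_pyIdx_lt (n : Nat) (i : Int) (k : Nat)
    (h : PySem.List.pyIdx? n i = some k) : k < n := by
  simp only [PySem.List.pyIdx?] at h
  split_ifs at h with h1 h2 h3 <;>
    simp only [Option.some.injEq] at h <;> omega

theorem pv_pyIdx_some (n : Nat) (i : Int) (h1 : -(n : Int) ≤ i) (h2 : i < n) :
    ∃ k, PySem.List.pyIdx? n i = some k := by
  simp only [PySem.List.pyIdx?]
  split_ifs <;> exact ⟨_, rfl⟩

theorem pvBump_eq_set (f : List Int) (i : Int) (k : Nat)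
    (h : PySem.List.pyIdx? f.length i = some k) :
    pvBump f i = f.set k (f.getD k 0 + 1) := by
  have hk := pv_pyIdx_lt _ _ _ h
  simp [pvBump, PySem.List.pySetD, PySem.List.pySet?, PySem.List.pyGetD, PySem.List.pyGet?, h,
    List.getD_eq_getElem?_getD, List.getElem?_eq_getElem hk]

theorem pvBump_comm (f : List Int) (i j : Int)
    (hi1 : -(f.length : Int) ≤ i) (hi2 : i < f.length)
    (hj1 : -(f.length : Int) ≤ j) (hj2 : j < f.length) :
    pvBump (pvBump f i) j = pvBump (pvBump f j) i := by
  obtain ⟨ki, hki⟩ := pv_pyIdx_some f.length i hi1 hi2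
  obtain ⟨kj, hkj⟩ := pv_pyIdx_some f.length j hj1 hj2
  have hkil := pv_pyIdx_lt _ _ _ hki
  have hkjl := pv_pyIdx_lt _ _ _ hkj
  have lbi : (pvBump f i).length = f.length := pvBump_length f i
  have lbj : (pvBump f j).length = f.length := pvBump_length f j
  have e1 := pvBump_eq_set f i ki hki
  have e2 := pvBump_eq_set f j kj hkj
  have e3 : pvBump (pvBump f i) j = (pvBump f i).set kj ((pvBump f i).getD kj 0 + 1) :=
    pvBump_eq_set _ j kj (by rw [lbi]; exact hkj)
  have e4 : pvBump (pvBump f j) i = (pvBump f j).set ki ((pvBump f j).getD ki 0 + 1) :=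
    pvBump_eq_set _ i ki (by rw [lbj]; exact hki)
  rw [e3, e4, e1, e2]
  by_cases hk : ki = kj
  · subst hk
    simp [List.getD_eq_getElem?_getD, List.getElem?_set_self', List.set_set,
      List.getElem?_eq_getElem hkil]
  · simp only [List.getD_eq_getElem?_getD]
    rw [List.getElem?_set_ne (show ki ≠ kj from hk), List.getElem?_set_ne (show kj ≠ ki from fun h => hk h.symm),
      ]
    exact List.set_comm _ _ hk

-- pull one g2-step through a g1-fold, given elementwise commutation under an invariant
theorem pv_foldl_swap {α β : Type} (g1 g2 : β → α → β) (P : α → Prop) (Inv : β → Prop)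
    (h1 : ∀ s a, Inv s → P a → Inv (g1 s a))
    (hcomm : ∀ s x y, Inv s → P x → P y → g2 (g1 s x) y = g1 (g2 s y) x) :
    ∀ (l : List α) (s : β) (a : α), Inv s → P a → (∀ x ∈ l, P x) →
      g2 (l.foldl g1 s) a = l.foldl g1 (g2 s a) := by
  intro l
  induction l with
  | nil => intro s a _ _ _; rfl
  | cons x t ih =>
      intro s a hs ha hl
      simp only [List.foldl_cons]
      rw [ih (g1 s x) a (h1 s x hs (hl x (by simp))) ha (fun y hy => hl y (by simp [hy])),
        hcomm s x a hs (hl x (by simp)) ha]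

-- fuse two sequential folds over the same list into one
theorem pv_foldl_fuse {α β : Type} (g1 g2 : β → α → β) (P : α → Prop) (Inv : β → Prop)
    (h1 : ∀ s a, Inv s → P a → Inv (g1 s a))
    (h2 : ∀ s a, Inv s → P a → Inv (g2 s a))
    (hcomm : ∀ s x y, Inv s → P x → P y → g2 (g1 s x) y = g1 (g2 s y) x) :
    ∀ (l : List α) (s : β), Inv s → (∀ x ∈ l, P x) →
      l.foldl g2 (l.foldl g1 s) = l.foldl (fun s a => g2 (g1 s a) a) s := by
  intro l
  induction l with
  | nil => intro s _ _; rfl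
  | cons a t ih =>
      intro s hs hl
      have ha : P a := hl a (by simp)
      have ht : ∀ x ∈ t, P x := fun y hy => hl y (by simp [hy])
      simp only [List.foldl_cons]
      rw [pv_foldl_swap g1 g2 P Inv h1 hcomm t (g1 s a) a (h1 s a hs ha) ha ht,
        ih (g2 (g1 s a) a) (h2 _ a (h1 s a hs ha) ha) ht]

-- proof-only abbreviations for the three tally steps and the loop invariant
def pvC1 (s : List Int) (a : Int × Int) : List Int :=
  if a.1 ≠ a.2 ∧ a.1 < 8 then pvBump s (a.1 - 1) else s
def pvC2 (s : List Int) (a : Int × Int) : List Int :=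
  if a.1 ≠ a.2 ∧ 16 < a.1 ∧ a.1 < 26 then pvBump s (a.1 - 10) else s
def pvC3 (s : List Int) (a : Int × Int) : List Int :=
  if a.1 ≠ a.2 ∧ 32 < a.1 then pvBump s (a.1 - 19) else s
def pvC12 (s : List Int) (a : Int × Int) : List Int := pvC2 (pvC1 s a) a
def pvP (a : Int × Int) : Prop :=
  a.1 ≠ a.2 → (a.1 < 8 → -20 ≤ a.1) ∧ (32 < a.1 → a.1 ≤ 39)
def pvInv (s : List Int) : Prop := s.length = 21

theorem pvBump_comm21 (s : List Int) (hs : pvInv s) (i j : Int)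
    (hi1 : -21 ≤ i) (hi2 : i < 21) (hj1 : -21 ≤ j) (hj2 : j < 21) :
    pvBump (pvBump s i) j = pvBump (pvBump s j) i := by
  have hs' : s.length = 21 := hs
  refine pvBump_comm s i j ?_ ?_ ?_ ?_ <;> rw [hs'] <;> omega

theorem pvInv_C1 (s : List Int) (a : Int × Int) (hs : pvInv s) (_ : pvP a) :
    pvInv (pvC1 s a) := by
  unfold pvC1; split_ifs <;> simp [pvInv, pvBump_length] <;> exact hs
theorem pvInv_C2 (s : List Int) (a : Int × Int) (hs : pvInv s) (_ : pvP a) :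
    pvInv (pvC2 s a) := by
  unfold pvC2; split_ifs <;> simp [pvInv, pvBump_length] <;> exact hs
theorem pvInv_C3 (s : List Int) (a : Int × Int) (hs : pvInv s) (_ : pvP a) :
    pvInv (pvC3 s a) := by
  unfold pvC3; split_ifs <;> simp [pvInv, pvBump_length] <;> exact hs
theorem pvInv_C12 (s : List Int) (a : Int × Int) (hs : pvInv s) (ha : pvP a) :
    pvInv (pvC12 s a) := pvInv_C2 _ _ (pvInv_C1 _ _ hs ha) ha

theorem pvComm_C1_C2 (s : List Int) (x y : Int × Int) (hs : pvInv s)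
    (hx : pvP x) (_hy : pvP y) : pvC2 (pvC1 s x) y = pvC1 (pvC2 s y) x := by
  unfold pvC1 pvC2
  split_ifs with h1 h2 <;> try rfl
  · have hbx : -20 ≤ x.1 := (hx h2.1).1 h2.2
    exact pvBump_comm21 s hs _ _ (by omega) (by omega) (by omega) (by omega)

theorem pvComm_C12_C3 (s : List Int) (x y : Int × Int) (hs : pvInv s)
    (hx : pvP x) (hy : pvP y) : pvC3 (pvC12 s x) y = pvC12 (pvC3 s y) x := by
  unfold pvC12 pvC1 pvC2 pvC3
  split_ifs with h1 h2 h3 <;> try rfl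
  · exfalso; omega
  · have hby : y.1 ≤ 39 := (hy h1.1).2 h1.2
    exact pvBump_comm21 s hs _ _ (by omega) (by omega) (by omega) (by omega)
  · rename_i hxc
    have hbx : -20 ≤ x.1 := (hx hxc.1).1 hxc.2
    have hby : y.1 ≤ 39 := (hy h1.1).2 h1.2
    exact pvBump_comm21 s hs _ _ (by omega) (by omega) (by omega) (by omega)

-- each of A's filter-then-tally pass pairs is one conditional fold over actions
theorem pv_pass1 (acts : List (Int × Int)) (s : List Int) :
    (acts.foldl (fun w a => if a.1 ≠ a.2 ∧ a.1 < 8 then w ++ [a] else w)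
        ([] : List (Int × Int))).foldl (fun f a => pvBump f (a.1 - 1)) s
      = acts.foldl pvC1 s :=
  pv_build_fold _ _ acts [] s
theorem pv_pass2 (acts : List (Int × Int)) (s : List Int) :
    (acts.foldl (fun w a => if a.1 ≠ a.2 ∧ 16 < a.1 ∧ a.1 < 26 then w ++ [a] else w)
        ([] : List (Int × Int))).foldl (fun f a => pvBump f (a.1 - 10)) s
      = acts.foldl pvC2 s :=
  pv_build_fold _ _ acts [] s
theorem pv_pass3 (acts : List (Int × Int)) (s : List Int) :
    (acts.foldl (fun w a => if a.1 ≠ a.2 ∧ 32 < a.1 then w ++ [a] else w)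
        ([] : List (Int × Int))).foldl (fun f a => pvBump f (a.1 - 19)) s
      = acts.foldl pvC3 s :=
  pv_build_fold _ _ acts [] s

-- B's single-pass step is the composition of the three disjoint steps
theorem pvStep_eq : (fun (s : List Int) (a : Int × Int) => pvC3 (pvC12 s a) a)
    = (fun (f : List Int) (a : Int × Int) =>
        if a.1 ≠ a.2 then
          if a.1 < 8 then pvBump f (a.1 - 1)
          else if 16 < a.1 ∧ a.1 < 26 then pvBump f (a.1 - 10)
          else if 32 < a.1 then pvBump f (a.1 - 19)
          else f
        else f) := by
  funext s a
  unfold pvC12 pvC1 pvC2 pvC3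
  split_ifs <;> first | rfl | (exfalso; omega)

-- ===== VERDICT (by name: the statement is the Claim_ definition above) =====
theorem shunziNum_spec : Claim_equal_shunziNum := by
  intro actions _ hpre
  have hP : ∀ x ∈ actions, pvP x := fun x hx => hpre x hx
  show shunziNum actions = shunziNum_alt actions
  calc shunziNum actions
      = actions.foldl pvC3 (actions.foldl pvC2 (actions.foldl pvC1 (List.replicate 21 0))) := by
        unfold shunziNum
        dsimp only
        rw [pv_pass3, pv_pass2, pv_pass1]
        rfl
    _ = actions.foldl pvC3 (actions.foldl pvC12 (List.replicate 21 0)) := by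
        rw [pv_foldl_fuse pvC1 pvC2 pvP pvInv pvInv_C1 pvInv_C2 pvComm_C1_C2 actions
          (List.replicate 21 0) (by unfold pvInv; rfl) hP]
        rfl
    _ = actions.foldl (fun s a => pvC3 (pvC12 s a) a) (List.replicate 21 0) :=
        pv_foldl_fuse pvC12 pvC3 pvP pvInv pvInv_C12 pvInv_C3 pvComm_C12_C3 actions
          (List.replicate 21 0) (by unfold pvInv; rfl) hP
    _ = shunziNum_alt actions := by rw [pvStep_eq]; rfl
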